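-- pv_equiv track=rewrite | github.com/Felooo8/Shannon_Game | the_game/AI.py | _fastest_roads
-- ===== SOURCE A (Python) =====
-- def _fastest_roads(moves):
--     '''
--     Returns list of fastest roads (if their lenght is equal).
--     lenght = number of moves to win
--     '''
--     best_roads = []
--     count = None
--     for road in moves:
--         lenght = len(road)
--         if count is None:
--             count = lenght
--             best_roads = [road]
--         elif lenght < count:
--             count = lenght
--             best_roads = [road]
--         elif lenght == count:
--             best_roads.append(road)
--     return best_roads
-- ===== SOURCE B (Python) =====
-- def _fastest_roads(moves):
--     if not moves:
--         return []
--     m = min(len(r) for r in moves)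
--     return [r for r in moves if len(r) == m]
-- ===== Notes on version B (the rewrite author's own statement) =====
-- stated objective: simpler
-- what changed: Replaces the single accumulating pass that tracks a running best count and resets/appends the result list with a reduce-to-scalar min of the lengths followed by a separate filter pass (empty input guarded).
import Mathlib
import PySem

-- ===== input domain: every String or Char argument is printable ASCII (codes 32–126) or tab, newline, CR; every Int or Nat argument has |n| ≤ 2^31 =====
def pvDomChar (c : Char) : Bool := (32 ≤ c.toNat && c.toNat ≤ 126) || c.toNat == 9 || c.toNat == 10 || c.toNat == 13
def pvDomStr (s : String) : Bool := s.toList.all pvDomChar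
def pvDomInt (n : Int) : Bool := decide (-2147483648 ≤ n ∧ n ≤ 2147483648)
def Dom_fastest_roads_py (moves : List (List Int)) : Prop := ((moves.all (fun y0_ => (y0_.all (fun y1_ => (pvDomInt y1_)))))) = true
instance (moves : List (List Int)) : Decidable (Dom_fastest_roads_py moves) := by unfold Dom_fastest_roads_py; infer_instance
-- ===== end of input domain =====

-- B replaces A's single accumulating pass (running best count, reset/append) with
-- min-of-lengths followed by a filter pass (objective: simpler).

-- ===== PORT A =====
-- state = (best_roads, count); count is None before the first road
def fastestStepA (st : List (List Int) × Option Int) (road : List Int) :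
    List (List Int) × Option Int :=
  let lenght : Int := road.length
  match st.2 with
  | none => ([road], some lenght)
  | some count =>
    if lenght < count then ([road], some lenght)
    else if lenght = count then (st.1 ++ [road], some count)
    else st

def fastest_roads_py (moves : List (List Int)) : List (List Int) :=
  (moves.foldl fastestStepA ([], none)).1

-- ===== PORT B =====
def fastest_roads_py_alt (moves : List (List Int)) : List (List Int) :=
  match moves with
  | [] => []
  | r :: rs =>
    -- m = min(len(r) for r in moves): fold of min over the lengths
    let m : Int := rs.foldl (fun acc road => min acc (road.length : Int)) (r.length : Int)
    moves.filter (fun road => (road.length : Int) == m)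

-- ===== PRECONDITION & SPEC =====
def Spec_fastest_roads_py (moves : List (List Int)) (out : List (List Int)) : Prop := out = fastest_roads_py_alt moves
instance (moves : List (List Int)) (out : List (List Int)) : Decidable (Spec_fastest_roads_py moves out) := by unfold Spec_fastest_roads_py; infer_instance

-- ===== CLAIM (what is proved, stated in full; the proofs are below) =====
def Claim_equal_fastest_roads_py : Prop := ∀ (moves : List (List Int)), Dom_fastest_roads_py moves → Spec_fastest_roads_py moves (fastest_roads_py moves)

-- ===== LEMMAS AND PROOFS =====

-- the running minimum never exceeds its seed
theorem minfold_le (t : List (List Int)) : ∀ (c : Int),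
    t.foldl (fun acc road => min acc (road.length : Int)) c ≤ c := by
  induction t with
  | nil => intro c; simp
  | cons x xs ih =>
    intro c
    simpa using le_trans (ih (min c (x.length : Int))) (min_le_left _ _)

-- Invariant: folding A's step from (b, some c) yields the running minimum m of c and the
-- lengths, and a list keeping b only if the minimum never dropped below c, followed by
-- the suffix roads of length m.
theorem fastestA_inv (rs : List (List Int)) :
    ∀ (b : List (List Int)) (c : Int),
      rs.foldl fastestStepA (b, some c) =
        ((if rs.foldl (fun acc road => min acc (road.length : Int)) c = c then b else []) ++
           rs.filter (fun road => (road.length : Int) == rs.foldl (fun acc road => min acc (road.length : Int)) c),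
         some (rs.foldl (fun acc road => min acc (road.length : Int)) c)) := by
  induction rs with
  | nil => intro b c; simp
  | cons r t ih =>
    intro b c
    by_cases h1 : (r.length : Int) < c
    · have hminc : min c (r.length : Int) = (r.length : Int) := by omega
      rw [List.foldl_cons, show fastestStepA (b, some c) r = ([r], some (r.length : Int)) from by
            simp [fastestStepA, h1], ih]
      simp only [List.foldl_cons, List.filter_cons, hminc]
      have hle := minfold_le t (r.length : Int)
      by_cases h2 : t.foldl (fun acc road => min acc (road.length : Int)) (r.length : Int) = (r.length : Int)
      · simp [h2, show ¬ ((r.length : Int) = c) by omega]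
      · simp [h2, show ¬ (t.foldl (fun acc road => min acc (road.length : Int)) (r.length : Int) = c) by omega,
              show ((r.length : Int) == t.foldl (fun acc road => min acc (road.length : Int)) (r.length : Int)) = false by
                simp; omega]
    · by_cases h2 : (r.length : Int) = c
      · have hminc : min c (r.length : Int) = c := by omega
        rw [List.foldl_cons, show fastestStepA (b, some c) r = (b ++ [r], some c) from by
              simp [fastestStepA, h2], ih]
        simp only [List.foldl_cons, List.filter_cons, hminc]
        have hle := minfold_le t c
        by_cases h3 : t.foldl (fun acc road => min acc (road.length : Int)) c = c
        · simp [h3, h2]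
        · simp [h3, show ((r.length : Int) == t.foldl (fun acc road => min acc (road.length : Int)) c) = false by
                simp; omega]
      · have hminc : min c (r.length : Int) = c := by omega
        rw [List.foldl_cons, show fastestStepA (b, some c) r = (b, some c) from by
              simp [fastestStepA, h2]; omega, ih]
        simp only [List.foldl_cons, List.filter_cons, hminc]
        have hle := minfold_le t c
        simp [show ((r.length : Int) == t.foldl (fun acc road => min acc (road.length : Int)) c) = false by
                simp; omega]

-- ===== VERDICT (by name: the statement is the Claim_ definition above) =====
theorem fastest_roads_py_spec : Claim_equal_fastest_roads_py := by
  intro moves _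
  unfold Spec_fastest_roads_py fastest_roads_py fastest_roads_py_alt
  match moves with
  | [] => rfl
  | r :: rs =>
    rw [List.foldl_cons, show fastestStepA ([], none) r = ([r], some (r.length : Int)) from by
          simp [fastestStepA], fastestA_inv]
    have hle := minfold_le rs (r.length : Int)
    simp only [List.filter_cons]
    by_cases h : rs.foldl (fun acc road => min acc (road.length : Int)) (r.length : Int) = (r.length : Int)
    · simp [h]
    · simp [h, show ((r.length : Int) == rs.foldl (fun acc road => min acc (road.length : Int)) (r.length : Int)) = false by
              simp; omega]
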